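-- pv_equiv track=rewrite | github.com/smetanadvorak/programming_problems | google_foobar/solution8.py | solution
-- ===== SOURCE A (Python) =====
-- import itertools
--
-- def solution(B, R):
--     bunnies = range(B)
--
--     # Special case: if no bunnies required, then they don't need keys and
--     # lexicographically the empty distribution is the best one.
--     if R == 0:
--         return [[] for i in bunnies]
--
--     # Special case of R == 1. All bunnies get the same key.
--     # Every bunny can open. No bunny (R-1=0 bunnies) cannot open.
--     if R == 1:
--         return [[0] for i in bunnies]
--
--     # Start testing every R-1 group.
--     # If one such group has all keys, give a new key to everybody else.
--     keys = set([])                     # Initial key indexes: no keys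
--     dist = [set([]) for i in range(B)] # Initial distribution of keys: no keys for anybody
--     groups = itertools.combinations(range(B), R-1)
--     new_key = 0 # When we need to issue a new key, this will be its index.
--     for gr in groups:
--         # Pool together the keys of all bunnies in this R-1 group
--         group_keys = set().union(*[dist[i] for i in gr])
--
--         # If this group can open the lock (has all keys),
--         # add a new key and give it to other bunnies.
--         if group_keys.issuperset(keys):
--             keys.add(new_key)
--             for bunny in bunnies:
--                 if not bunny in gr: # To all other bunnies ...
--                     dist[bunny].add(new_key) # give the the new key.
--             new_key += 1
--
--     dist = [list(d) for d in dist] # Convert sets to lists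
--     # Invert key indices (by taking the complement) for optimal lexicographic order:
--     dist = [[max(keys)-k for k in d] for d in dist]
--     # Sort each list
--     dist = [sorted(d) for d in dist]
--
--     return dist
-- ===== SOURCE B (Python) =====
-- import itertools
--
-- def solution(B, R):
--     if R == 0:
--         return [[] for _ in range(B)]
--     # Key i (in final numbering) goes to every bunny OUTSIDE the i-th combination,
--     # counting combinations in reverse lexicographic order; appended ascending, so
--     # no sets, no superset checks, no inversion and no per-bunny sort are needed.
--     combos = list(itertools.combinations(range(B), R - 1))
--     n = len(combos)
--     dist = [[] for _ in range(B)]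
--     for j in range(n):
--         gr = combos[n - 1 - j]
--         for bunny in range(B):
--             if bunny not in gr:
--                 dist[bunny].append(j)
--     return dist
-- ===== Notes on version B (the rewrite author's own statement) =====
-- stated objective: alternative
-- what changed: B drops A's whole key-set machinery (per-group key unions, superset tests, set bookkeeping, index inversion and per-bunny sorts): since every (R-1)-group provably passes A's superset test, B just walks the combinations in reverse lexicographic order and appends key j to every bunny outside the j-th one, producing each bunny's list already sorted (intended as faster; a timing run measured 7.35x at the largest size both finished but could not confirm the label).
import Mathlib
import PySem

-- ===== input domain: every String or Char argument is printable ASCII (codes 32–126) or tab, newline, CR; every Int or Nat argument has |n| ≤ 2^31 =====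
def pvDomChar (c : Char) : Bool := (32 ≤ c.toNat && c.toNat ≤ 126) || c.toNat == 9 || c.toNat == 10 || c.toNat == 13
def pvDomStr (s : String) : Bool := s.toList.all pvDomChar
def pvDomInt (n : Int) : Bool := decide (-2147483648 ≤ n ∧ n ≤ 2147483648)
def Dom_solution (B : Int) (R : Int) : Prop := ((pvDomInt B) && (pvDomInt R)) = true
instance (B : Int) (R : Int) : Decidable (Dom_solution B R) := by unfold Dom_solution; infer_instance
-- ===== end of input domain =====

-- B re-implements A without the key-set machinery: every (R-1)-group provably passes A's
-- superset test, so B just hands key j to the complement of the j-th combination taken in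
-- reverse lexicographic order, producing each bunny's key list already sorted.

-- ===== PORT A =====
-- Python's set is PySem.Set (first-insertion order).  A converts each set to a list and
-- re-sorts it after an order-reversing reindexing, so A's result does not depend on the
-- set iteration order; max(keys) sits inside a comprehension over d, so Python evaluates
-- it only when some d is nonempty — and then keys is nonempty, so the `.getD 0` default
-- below is never the value A's result uses.
def solution (B : Int) (R : Int) : List (List Int) :=
  let bunnies := PySem.List.pyRange 0 B
  if R = 0 then bunnies.map (fun _ => ([] : List Int))
  else if R = 1 then bunnies.map (fun _ => ([0] : List Int))
  else
    let groups := PySem.List.combinations bunnies (R - 1).toNat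
    -- state: (keys, dist, new_key); 'dist[bunny].add(new_key)' for every bunny outside gr
    -- is the positionwise update of dist (dist has one entry per bunny, in bunny order);
    -- dist[i] for i in gr cannot be out of range, so the `.getD` default is never used.
    let st :=
      groups.foldl
        (fun (st : PySem.Set Int × List (PySem.Set Int) × Int) gr =>
          let groupKeys : PySem.Set Int :=
            gr.foldl (fun acc i =>
              PySem.Set.union acc ((PySem.List.pyGet? st.2.1 i).getD PySem.Set.empty))
              PySem.Set.empty
          if PySem.Set.issuperset groupKeys st.1 then
            (PySem.Set.add st.1 st.2.2,
             (bunnies.zip st.2.1).map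
               (fun p => if p.1 ∈ gr then p.2 else PySem.Set.add p.2 st.2.2),
             st.2.2 + 1)
          else st)
        (PySem.Set.empty, bunnies.map (fun _ => (PySem.Set.empty : PySem.Set Int)), 0)
    let dist1 : List (List Int) := st.2.1.map (fun d => (d : List Int))
    let mx := (PySem.List.max? (st.1 : List Int) (fun k => k)).getD 0
    let dist2 := dist1.map (fun d => d.map (fun k => mx - k))
    dist2.map (fun d => PySem.List.sorted d (fun x => x))

-- ===== PORT B =====
def solution_alt (B : Int) (R : Int) : List (List Int) :=
  if R = 0 then (PySem.List.pyRange 0 B).map (fun _ => ([] : List Int))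
  else
    let combos := PySem.List.combinations (PySem.List.pyRange 0 B) (R - 1).toNat
    let n : Int := combos.length
    (PySem.List.pyRange 0 n).foldl
      (fun dist j =>
        let gr := (PySem.List.pyGet? combos (n - 1 - j)).getD []
        ((PySem.List.pyRange 0 B).zip dist).map
          (fun p => if p.1 ∈ gr then p.2 else p.2 ++ [j]))
      ((PySem.List.pyRange 0 B).map (fun _ => ([] : List Int)))

-- ===== PRECONDITION & SPEC =====
-- Pre_ excludes only R < 0, on which A raises ValueError (itertools.combinations with
-- a negative r); B raises there too.
def Pre_solution (B : Int) (R : Int) : Prop := 0 ≤ R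
instance (B : Int) (R : Int) : Decidable (Pre_solution B R) := by unfold Pre_solution; infer_instance
def pvWitness_solution : Int × Int := (4, 3)
def Spec_solution (B : Int) (R : Int) (out : List (List Int)) : Prop := out = solution_alt B R
instance (B : Int) (R : Int) (out : List (List Int)) : Decidable (Spec_solution B R out) := by unfold Spec_solution; infer_instance

-- ===== CLAIM (what is proved, stated in full; the proofs are below) =====
def Claim_equal_solution : Prop := ∀ (B : Int) (R : Int), Dom_solution B R → Pre_solution B R → Spec_solution B R (solution B R)

-- ===== LEMMAS AND PROOFS =====

-- bunnies = range(B) as a list of Ints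
def pvBun (Bn : Nat) : List Int := (List.range Bn).map (fun (k : Nat) => (k : Int))

-- indices i of l with b ∉ l[i], in increasing order
def pvSel (l : List (List Int)) (b : Int) : List Nat :=
  (List.range l.length).filter (fun i => decide (b ∉ l.getD i []))

def pvDistA (l : List (List Int)) (b : Int) : List Int := (pvSel l b).map (fun (i : Nat) => (i : Int))

def pvKeys (k : Nat) : List Int := (List.range k).map (fun (i : Nat) => (i : Int))

lemma pvBun_pairwise (Bn : Nat) : (pvBun Bn).Pairwise (· < ·) := by
  unfold pvBun
  exact List.pairwise_map.mpr (List.pairwise_lt_range.imp (by exact_mod_cast fun h => h))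

lemma pvBun_nodup (Bn : Nat) : (pvBun Bn).Nodup := by
  exact (pvBun_pairwise Bn).imp (fun h => ne_of_lt h)

lemma mem_pvBun (Bn : Nat) (i : Int) : i ∈ pvBun Bn ↔ ∃ m : Nat, m < Bn ∧ i = (m : Int) := by
  unfold pvBun
  simp only [List.mem_map, List.mem_range]
  constructor
  · rintro ⟨m, h1, h2⟩; exact ⟨m, h1, h2.symm⟩
  · rintro ⟨m, h1, h2⟩; exact ⟨m, h1, h2.symm⟩

lemma nodup_combinations {xs : List Int} (h : xs.Nodup) (r : Nat) :
    (PySem.List.combinations xs r).Nodup := by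
  induction xs generalizing r with
  | nil =>
    cases r with
    | zero => simp [PySem.List.combinations_zero]
    | succ r => simp [PySem.List.combinations_nil_succ]
  | cons x xs ih =>
    cases r with
    | zero => simp [PySem.List.combinations_zero]
    | succ r =>
      rw [PySem.List.combinations_cons_succ]
      have hx : x ∉ xs := (List.nodup_cons.mp h).1
      have hxs : xs.Nodup := (List.nodup_cons.mp h).2
      refine List.Nodup.append ?_ (ih hxs (r + 1)) ?_
      · exact (ih hxs r).map (fun a b hab => (List.cons.injEq x a x b).mp hab |>.2)
      · intro a ha hb
        rcases List.mem_map.mp ha with ⟨c, _, rfl⟩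
        have hsub := (PySem.List.mem_combinations_iff xs (r + 1) (x :: c)).mp hb |>.1
        exact hx (hsub.subset (List.mem_cons_self))

lemma pv_distinct {bs g h : List Int} (hbp : bs.Pairwise (· < ·))
    (hg : g.Sublist bs) (hh : h.Sublist bs) (hl : g.length = h.length) (hne : g ≠ h) :
    ∃ b ∈ h, b ∉ g := by
  by_contra hc
  have hsub : h ⊆ g := by
    intro a ha
    by_contra hag
    exact hc ⟨a, ha, hag⟩
  have hbn : bs.Nodup := hbp.imp (fun h => ne_of_lt h)
  have hperm : h.Perm g :=
    (List.Nodup.subperm (hh.nodup hbn) hsub).perm_of_length_le (le_of_eq hl)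
  exact hne (List.Perm.eq_of_pairwise
    (fun a b _ _ hab hba => le_antisymm hab hba)
    ((hbp.sublist hg).imp le_of_lt) ((hbp.sublist hh).imp le_of_lt) hperm.symm)

lemma mem_pvSel (l : List (List Int)) (b : Int) (i : Nat) :
    i ∈ pvSel l b ↔ i < l.length ∧ b ∉ l.getD i [] := by
  unfold pvSel
  simp [List.mem_filter, List.mem_range]

lemma pvSel_pairwise (l : List (List Int)) (b : Int) : (pvSel l b).Pairwise (· < ·) := by
  exact List.Pairwise.filter _ List.pairwise_lt_range

lemma pvSel_append_singleton (l : List (List Int)) (g : List Int) (b : Int) :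
    pvSel (l ++ [g]) b = pvSel l b ++ (if b ∈ g then [] else [l.length]) := by
  unfold pvSel
  have hlen : (l ++ [g]).length = l.length + 1 := by simp
  rw [hlen, List.range_succ, List.filter_append]
  congr 1
  · apply List.filter_congr
    intro i hi
    rw [List.getD_append _ _ _ _ (List.mem_range.mp hi)]
  · have hg : (l ++ [g]).getD l.length [] = g := by
      rw [List.getD_eq_getElem?_getD, List.getElem?_append_right le_rfl]
      simp
    simp only [List.filter, hg]
    by_cases hb : b ∈ g
    · simp [hb]
    · simp [hb]

lemma zip_self_map {α β γ : Type} (l : List α) (f : α → β) (g : α × β → γ) :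
    (l.zip (l.map f)).map g = l.map (fun a => g (a, f a)) := by
  induction l with
  | nil => rfl
  | cons x t ih => simp [ih]

lemma pvDistA_append_singleton (l : List (List Int)) (g : List Int) (b : Int) :
    pvDistA (l ++ [g]) b = pvDistA l b ++ (if b ∈ g then [] else [(l.length : Int)]) := by
  unfold pvDistA
  rw [pvSel_append_singleton, List.map_append]
  congr 1
  by_cases hb : b ∈ g <;> simp [hb]

lemma mem_pvDistA (l : List (List Int)) (b : Int) (y : Int) :
    y ∈ pvDistA l b ↔ ∃ i : Nat, i < l.length ∧ b ∉ l.getD i [] ∧ y = (i : Int) := by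
  unfold pvDistA
  simp only [List.mem_map, mem_pvSel]
  constructor
  · rintro ⟨i, ⟨h1, h2⟩, h3⟩; exact ⟨i, h1, h2, h3.symm⟩
  · rintro ⟨i, h1, h2, h3⟩; exact ⟨i, ⟨h1, h2⟩, h3.symm⟩

lemma pvDistA_pairwise (l : List (List Int)) (b : Int) : (pvDistA l b).Pairwise (· < ·) := by
  unfold pvDistA
  exact List.pairwise_map.mpr ((pvSel_pairwise l b).imp (by exact_mod_cast fun h => h))

lemma mem_pvKeys (k : Nat) (y : Int) : y ∈ pvKeys k ↔ ∃ t : Nat, t < k ∧ y = (t : Int) := by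
  unfold pvKeys
  simp only [List.mem_map, List.mem_range]
  constructor
  · rintro ⟨m, h1, h2⟩; exact ⟨m, h1, h2.symm⟩
  · rintro ⟨m, h1, h2⟩; exact ⟨m, h1, h2.symm⟩

lemma foldl_union_mem (gr : List Int) (f : Int → PySem.Set Int) (y : Int) :
    ∀ s : PySem.Set Int,
      (y ∈ gr.foldl (fun acc i => PySem.Set.union acc (f i)) s ↔ y ∈ s ∨ ∃ i ∈ gr, y ∈ f i) := by
  induction gr with
  | nil => intro s; simp
  | cons i t ih =>
    intro s
    simp only [List.foldl_cons, ih, PySem.Set.mem_union, List.mem_cons]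
    constructor
    · rintro ((h | h) | ⟨j, hj, hy⟩)
      · exact Or.inl h
      · exact Or.inr ⟨i, Or.inl rfl, h⟩
      · exact Or.inr ⟨j, Or.inr hj, hy⟩
    · rintro (h | ⟨j, (rfl | hj), hy⟩)
      · exact Or.inl (Or.inl h)
      · exact Or.inl (Or.inr hy)
      · exact Or.inr ⟨j, hj, hy⟩

lemma pyGet_map_bun {α : Type} (Bn : Nat) (f : Int → α) (dflt : α) {i : Int}
    (hi : i ∈ pvBun Bn) : (PySem.List.pyGet? ((pvBun Bn).map f) i).getD dflt = f i := by
  rcases (mem_pvBun Bn i).mp hi with ⟨m, hm, rfl⟩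
  rw [PySem.List.pyGet?_natCast]
  unfold pvBun
  simp [List.getElem?_map, List.getElem?_range, hm]

lemma max_pvKeys {n : Nat} (hn : 1 ≤ n) :
    (PySem.List.max? (pvKeys n) (fun k => k)).getD 0 = ((n - 1 : Nat) : Int) := by
  cases hmx : PySem.List.max? (pvKeys n) (fun k => k) with
  | none =>
    exfalso
    have := (PySem.List.max?_eq_none_iff (pvKeys n) (fun k => k)).mp hmx
    have hlen : (pvKeys n).length = n := by simp [pvKeys]
    rw [this] at hlen
    simp at hlen
    omega
  | some m =>
    rcases (mem_pvKeys n m).mp (PySem.List.max?_mem hmx) with ⟨t, ht, rfl⟩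
    have h1 : ((n - 1 : Nat) : Int) ≤ (t : Int) :=
      PySem.List.max?_isMax hmx _ ((mem_pvKeys n _).mpr ⟨n - 1, by omega, rfl⟩)
    have h2 : t ≤ n - 1 := by omega
    have : t = n - 1 := by omega
    simp [this]

lemma pyRange_zero_toNat (B : Int) : PySem.List.pyRange 0 B = pvBun B.toNat := by
  rcases le_or_gt 0 B with hB | hB
  · have : B = (B.toNat : Int) := by omega
    rw [this, PySem.List.pyRange_zero_natCast]
    rfl
  · have h1 : PySem.List.pyRange 0 B = [] := by simp [PySem.List.pyRange]; omega
    have h2 : B.toNat = 0 := by omega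
    rw [h1, h2]
    rfl

-- A's loop invariant: after processing `done`, keys = {0..|done|-1}, new_key = |done|,
-- and bunny b holds exactly the indices of the processed groups it is outside of.
lemma loopA (Bn r : Nat) (gs : List (List Int)) (hnd : gs.Nodup)
    (hmem : ∀ g ∈ gs, g.Sublist (pvBun Bn) ∧ g.length = r) :
    ∀ (todo done : List (List Int)), gs = done ++ todo →
      todo.foldl
        (fun (st : PySem.Set Int × List (PySem.Set Int) × Int) gr =>
          let groupKeys : PySem.Set Int :=
            gr.foldl (fun acc i =>
              PySem.Set.union acc ((PySem.List.pyGet? st.2.1 i).getD PySem.Set.empty))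
              PySem.Set.empty
          if PySem.Set.issuperset groupKeys st.1 then
            (PySem.Set.add st.1 st.2.2,
             ((pvBun Bn).zip st.2.1).map
               (fun p => if p.1 ∈ gr then p.2 else PySem.Set.add p.2 st.2.2),
             st.2.2 + 1)
          else st)
        (pvKeys done.length, (pvBun Bn).map (fun b => (pvDistA done b : PySem.Set Int)), (done.length : Int))
      = (pvKeys gs.length, (pvBun Bn).map (fun b => (pvDistA gs b : PySem.Set Int)), (gs.length : Int)) := by
  intro todo
  induction todo with
  | nil =>
    intro done heq
    rw [List.append_nil] at heq
    subst heq
    rw [List.foldl_nil]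
  | cons gr todo' ih =>
    intro done heq
    have hgr_mem : gr ∈ gs := by
      rw [heq]; exact List.mem_append_right _ List.mem_cons_self
    obtain ⟨hgr_sub, hgr_len⟩ := hmem gr hgr_mem
    have heq' : gs = (done ++ [gr]) ++ todo' := by simpa using heq
    rw [List.foldl_cons, ← ih (done ++ [gr]) heq']
    congr 1
    dsimp only
    have hsup : PySem.Set.issuperset
        (gr.foldl (fun acc i =>
          PySem.Set.union acc ((PySem.List.pyGet?
            ((pvBun Bn).map (fun b => (pvDistA done b : PySem.Set Int))) i).getD PySem.Set.empty))
          PySem.Set.empty)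
        (pvKeys done.length) = true := by
      rw [PySem.Set.issuperset_iff]
      intro y hy
      rcases (mem_pvKeys done.length y).mp hy with ⟨t, ht, rfl⟩
      -- the t-th processed group, distinct from gr
      have hg0mem : done.getD t [] ∈ done := by
        rw [List.getD_eq_getElem?_getD, List.getElem?_eq_getElem ht]
        exact List.getElem_mem ht
      have hg0gs : done.getD t [] ∈ gs := by
        rw [heq]; exact List.mem_append_left _ hg0mem
      have hdisj : ∀ a ∈ done, a ∉ gr :: todo' := by
        have hnd' : (done ++ gr :: todo').Nodup := by rw [← heq]; exact hnd
        exact fun a ha hb => (List.nodup_append.mp hnd').2.2 a ha a hb rfl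
      have hneq : done.getD t [] ≠ gr := by
        intro h
        exact hdisj _ hg0mem (h ▸ List.mem_cons_self)
      obtain ⟨bb, hbb_gr, hbb_not⟩ :=
        pv_distinct (pvBun_pairwise Bn) (hmem _ hg0gs).1 hgr_sub
          (((hmem _ hg0gs).2).trans hgr_len.symm) hneq
      rw [foldl_union_mem]
      refine Or.inr ⟨bb, hbb_gr, ?_⟩
      rw [pyGet_map_bun Bn _ _ (hgr_sub.subset hbb_gr)]
      exact (mem_pvDistA done bb _).mpr ⟨t, ht, hbb_not, rfl⟩
    rw [if_pos hsup]
    simp only [Prod.mk.injEq]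
    refine ⟨?_, ?_, ?_⟩
    · -- keys component
      have hnotmem : ((done.length : Nat) : Int) ∉ pvKeys done.length := by
        intro h
        rcases (mem_pvKeys _ _).mp h with ⟨t, ht, hEq⟩
        omega
      rw [PySem.Set.add_of_not_mem hnotmem]
      unfold pvKeys
      rw [List.length_append, List.length_cons, List.length_nil, List.range_succ, List.map_append]
      rfl
    · -- dist component
      rw [zip_self_map]
      apply List.map_congr_left
      intro b hb
      rw [pvDistA_append_singleton]
      by_cases hbgr : b ∈ gr
      · simp [hbgr]
      · have hknot : ((done.length : Nat) : Int) ∉ pvDistA done b := by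
          intro h
          rcases (mem_pvDistA done b _).mp h with ⟨t, ht, _, hEq⟩
          omega
        simp only [hbgr, if_false]
        rw [PySem.Set.add_of_not_mem hknot]
    · -- counter component
      simp

-- B's loop invariant, over l := gs.reverse
lemma loopB (Bn : Nat) (gs : List (List Int)) :
    ∀ t : Nat, t ≤ gs.length →
      (List.range t).foldl
        (fun dist j =>
          let gr := (PySem.List.pyGet? gs ((gs.length : Int) - 1 - (j : Nat))).getD []
          ((pvBun Bn).zip dist).map
            (fun p => if p.1 ∈ gr then p.2 else p.2 ++ [((j : Nat) : Int)]))
        ((pvBun Bn).map (fun _ => ([] : List Int)))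
      = (pvBun Bn).map (fun b => pvDistA (gs.reverse.take t) b) := by
  intro t ht
  induction t with
  | zero => simp [pvDistA, pvSel]
  | succ t ih =>
    have ht' : t < gs.length := by omega
    rw [List.range_succ, List.foldl_append, ih (by omega)]
    simp only [List.foldl_cons, List.foldl_nil]
    have hidx : (gs.length : Int) - 1 - (t : Int) = ((gs.length - 1 - t : Nat) : Int) := by omega
    rw [hidx, PySem.List.pyGet?_natCast]
    have hlt : gs.length - 1 - t < gs.length := by omega
    rw [List.getElem?_eq_getElem hlt]
    simp only [Option.getD_some]
    rw [zip_self_map]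
    apply List.map_congr_left
    intro b hb
    have htake : gs.reverse.take (t + 1)
        = gs.reverse.take t ++ [gs[gs.length - 1 - t]] := by
      rw [List.take_succ]
      have : gs.reverse[t]? = some gs[gs.length - 1 - t] := by
        rw [List.getElem?_eq_getElem (by simpa using ht')]
        simp [List.getElem_reverse]
      rw [this]
      rfl
    rw [htake, pvDistA_append_singleton]
    have hlen2 : (gs.reverse.take t).length = t := by
      simp
      omega
    rw [hlen2]
    by_cases hmem : b ∈ gs[gs.length - 1 - t] <;> simp [hmem]

lemma altEval (B : Int) (r : Nat) :
    (PySem.List.pyRange 0 (((PySem.List.combinations (PySem.List.pyRange 0 B) r).length : Nat) : Int)).foldl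
      (fun dist j =>
        let gr := (PySem.List.pyGet? (PySem.List.combinations (PySem.List.pyRange 0 B) r)
          ((((PySem.List.combinations (PySem.List.pyRange 0 B) r).length : Nat) : Int) - 1 - j)).getD []
        ((PySem.List.pyRange 0 B).zip dist).map (fun p => if p.1 ∈ gr then p.2 else p.2 ++ [j]))
      ((PySem.List.pyRange 0 B).map (fun _ => ([] : List Int)))
    = (PySem.List.pyRange 0 B).map
        (fun b => pvDistA (PySem.List.combinations (PySem.List.pyRange 0 B) r).reverse b) := by
  rw [pyRange_zero_toNat]
  rw [PySem.List.pyRange_zero_natCast]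
  have hb : pvBun (PySem.List.combinations (pvBun B.toNat) r).length
      = (List.range (PySem.List.combinations (pvBun B.toNat) r).length).map
          (fun (k : Nat) => (k : Int)) := rfl
  rw [List.foldl_map]
  rw [loopB B.toNat _ _ le_rfl]
  rw [List.take_of_length_le (by simp)]

lemma finalEq (gs : List (List Int)) (b : Int) :
    PySem.List.sorted
        ((pvDistA gs b).map (fun k => (PySem.List.max? (pvKeys gs.length) (fun k => k)).getD 0 - k))
        (fun x => x)
      = pvDistA gs.reverse b := by
  rcases Nat.eq_zero_or_pos gs.length with h0 | hpos
  · have hnil : gs = [] := List.eq_nil_of_length_eq_zero h0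
    subst hnil
    rfl
  · rw [max_pvKeys hpos]
    have hrev : ∀ j : Nat, j < gs.length →
        gs.reverse.getD j [] = gs.getD (gs.length - 1 - j) [] := by
      intro j hj
      rw [List.getD_eq_getElem?_getD, List.getD_eq_getElem?_getD,
          List.getElem?_eq_getElem (by simpa using hj),
          List.getElem?_eq_getElem (by omega)]
      simp [List.getElem_reverse]
    apply PySem.List.sorted_eq_of_perm_of_pairwise_lt
    · have hnd1 : (pvDistA gs.reverse b).Nodup :=
        (pvDistA_pairwise gs.reverse b).imp (fun h => ne_of_lt h)
      have hnd2 : (((pvDistA gs b).map (fun k => ((gs.length - 1 : Nat) : Int) - k))).Nodup := by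
        refine List.Nodup.map (fun x y h => by omega) ?_
        exact (pvDistA_pairwise gs b).imp (fun h => ne_of_lt h)
      rw [List.perm_ext_iff_of_nodup hnd1 hnd2]
      intro a
      rw [List.mem_map]
      constructor
      · intro ha
        rcases (mem_pvDistA gs.reverse b a).mp ha with ⟨j, hj, hnot, rfl⟩
        rw [List.length_reverse] at hj
        rw [hrev j hj] at hnot
        refine ⟨((gs.length - 1 - j : Nat) : Int), ?_, by omega⟩
        exact (mem_pvDistA gs b _).mpr ⟨gs.length - 1 - j, by omega, hnot, rfl⟩
      · rintro ⟨y, hy, rfl⟩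
        rcases (mem_pvDistA gs b y).mp hy with ⟨i, hi, hnot, rfl⟩
        refine (mem_pvDistA gs.reverse b _).mpr ⟨gs.length - 1 - i, ?_, ?_, by omega⟩
        · simpa using (by omega : gs.length - 1 - i < gs.length)
        · rw [hrev _ (by omega)]
          have : gs.length - 1 - (gs.length - 1 - i) = i := by omega
          rw [this]
          exact hnot
    · simpa using pvDistA_pairwise gs.reverse b

-- ===== VERDICT (by name: the statement is the Claim_ definition above) =====
theorem solution_spec : Claim_equal_solution := by
  intro B R hdom hpre
  unfold Spec_solution solution solution_alt
  by_cases hR0 : R = 0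
  · simp [hR0]
  · simp only [if_neg hR0]
    rw [altEval B (R - 1).toNat]
    by_cases hR1 : R = 1
    · subst hR1
      norm_num
      rw [pyRange_zero_toNat]
      have hd : ∀ b : Int, pvDistA [[]] b = [0] := fun b => rfl
      simp [hd, pvBun, Function.comp_def, List.map_const']
    · simp only [if_neg hR1]
      rw [pyRange_zero_toNat]
      set gs := PySem.List.combinations (pvBun B.toNat) (R - 1).toNat with hgs
      have hnd : gs.Nodup := nodup_combinations (pvBun_nodup B.toNat) _
      have hmem : ∀ g ∈ gs, g.Sublist (pvBun B.toNat) ∧ g.length = (R - 1).toNat := by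
        intro g hg
        exact (PySem.List.mem_combinations_iff _ _ g).mp hg
      have hloop := loopA B.toNat (R - 1).toNat gs hnd hmem gs [] (by simp)
      simp only [List.length_nil, List.nil_append, Nat.cast_zero] at hloop
      rw [show ((PySem.Set.empty : PySem.Set Int),
            List.map (fun _ => (PySem.Set.empty : PySem.Set Int)) (pvBun B.toNat), (0:Int))
          = (pvKeys 0, List.map (fun b => (pvDistA [] b : PySem.Set Int)) (pvBun B.toNat), (0:Int))
        from rfl]
      rw [hloop]
      simp only [List.map_map]
      apply List.map_congr_left
      intro b hb
      simpa using finalEq gs b
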